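-- pv_equiv track=rewrite | github.com/YvanDevTech/App-for-Poll | polls/utils.py | plurality_method
-- ===== SOURCE A (Python) =====
-- def plurality_method(order_votes, dict_cand):
--     for v in order_votes:
--         if len(v) > 1:
--             if v[0]["value"] != v[1]["value"]:
--                 dict_cand[v[0]["id"]]['y'] += 1
--         else:
--             dict_cand[v[0]["id"]]['y'] += 1
--
--     return list(dict_cand.values())
-- ===== SOURCE B (Python) =====
-- def plurality_method(order_votes, dict_cand):
--     # candidate-major: for each candidate, scan the votes and count the ones it wins,
--     # skipping candidates that won nothing (mutates dict_cand in place, like A;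
--     # equivalence is about the return value)
--     for cid, cd in dict_cand.items():
--         n = sum(
--             1 for v in order_votes
--             if (len(v) == 1 or v[0]["value"] != v[1]["value"]) and v[0]["id"] == cid
--         )
--         if n:
--             cd['y'] += n
--     return list(dict_cand.values())
-- ===== Notes on version B (the rewrite author's own statement) =====
-- stated objective: alternative
-- what changed: B inverts the loop nesting: instead of A's vote-major pass that increments dict_cand per winning vote, B iterates candidate-major, counting for each candidate the votes it wins with an inner scan over order_votes and adding that count once (skipping candidates that won nothing).
import Mathlib
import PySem

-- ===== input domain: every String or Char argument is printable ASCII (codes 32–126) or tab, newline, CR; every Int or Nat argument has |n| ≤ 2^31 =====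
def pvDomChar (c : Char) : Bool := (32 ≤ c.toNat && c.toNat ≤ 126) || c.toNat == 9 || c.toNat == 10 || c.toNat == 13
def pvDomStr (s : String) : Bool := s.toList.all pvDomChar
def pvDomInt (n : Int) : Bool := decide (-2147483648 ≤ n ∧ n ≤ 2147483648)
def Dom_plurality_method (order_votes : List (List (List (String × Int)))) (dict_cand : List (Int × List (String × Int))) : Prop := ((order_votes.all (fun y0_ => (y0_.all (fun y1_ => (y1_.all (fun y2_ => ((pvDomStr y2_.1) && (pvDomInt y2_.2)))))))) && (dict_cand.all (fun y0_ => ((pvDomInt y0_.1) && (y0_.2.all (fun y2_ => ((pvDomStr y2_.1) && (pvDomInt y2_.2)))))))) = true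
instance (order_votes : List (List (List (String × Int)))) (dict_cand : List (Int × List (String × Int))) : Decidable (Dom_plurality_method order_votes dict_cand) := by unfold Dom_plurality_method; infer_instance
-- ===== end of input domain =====

-- B inverts the loop nesting (candidate-major: for each candidate, count the votes it wins
-- with an inner scan over order_votes, skipping candidates that won nothing) instead of
-- A's vote-major guarded increment loop;
-- equivalence is about the return value — both Pythons also mutate dict_cand in place.


-- ===== PORT A =====
-- helper for the Python statement `<cand-dict>['y'] += n`: set the first "y"
-- binding to its value + n (Python raises KeyError when "y" is absent — excluded by Pre_,
-- here a no-op; PySem.Dict.modify would instead INSERT "y", which Python does not).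
def bumpY : List (String × Int) → Int → List (String × Int)
  | [], _ => []
  | (k, x) :: t, n => if k = "y" then (k, x + n) :: t else (k, x) :: bumpY t n

-- helper for A's `dict_cand[i]['y'] += n`: update the first entry with key i
-- (a Python dict has unique keys; KeyError when i is absent — excluded by Pre_, here a no-op).
def bumpAt : List (Int × List (String × Int)) → Int → Int → List (Int × List (String × Int))
  | [], _, _ => []
  | (k, cd) :: t, i, n => if k = i then (k, bumpY cd n) :: t else (k, cd) :: bumpAt t i n

def plurality_method (order_votes : List (List (List (String × Int)))) (dict_cand : List (Int × List (String × Int))) : List (List (String × Int)) :=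
  (order_votes.foldl
    (fun d v =>
      let v0 := PySem.List.pyGetD v 0 []
      if 1 < (v.length : Int) then
        if PySem.Dict.getD (PySem.Dict.mk v0) "value" 0
             ≠ PySem.Dict.getD (PySem.Dict.mk (PySem.List.pyGetD v 1 [])) "value" 0 then
          bumpAt d (PySem.Dict.getD (PySem.Dict.mk v0) "id" 0) 1
        else d
      else
        bumpAt d (PySem.Dict.getD (PySem.Dict.mk v0) "id" 0) 1)
    dict_cand).map (·.2)

-- ===== PORT B =====
-- B's inner scan: `sum(1 for v in order_votes if (len(v)==1 or v[0]["value"]!=v[1]["value"]) and v[0]["id"]==cid)`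
def countFor (order_votes : List (List (List (String × Int)))) (cid : Int) : Int :=
  order_votes.foldl
    (fun s v =>
      if ((v.length == 1)
            || !(PySem.Dict.getD (PySem.Dict.mk (PySem.List.pyGetD v 0 [])) "value" 0
                  == PySem.Dict.getD (PySem.Dict.mk (PySem.List.pyGetD v 1 [])) "value" 0))
          && (PySem.Dict.getD (PySem.Dict.mk (PySem.List.pyGetD v 0 [])) "id" 0 == cid)
      then s + 1 else s)
    0

-- B's outer loop mutates each candidate dict in place; as a value it maps each entry
-- (cid, cd) to (cid, cd with 'y' bumped by n = countFor order_votes cid when n ≠ 0,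
-- i.e. Python's `if n:`), then lists the values.
def plurality_method_alt (order_votes : List (List (List (String × Int)))) (dict_cand : List (Int × List (String × Int))) : List (List (String × Int)) :=
  (dict_cand.map (fun p =>
    let n := countFor order_votes p.1
    (p.1, if n ≠ 0 then bumpY p.2 n else p.2))).map (·.2)

-- ===== PRECONDITION & SPEC =====
-- key list of an association list (readability helper for Pre_)
def keysOf {α : Type} (l : List (String × α)) : List String := l.map (·.1)

-- Boolean winner test on a raw vote: the vote contributes an increment
-- (len(v) == 1, or the top two values differ)
def winsb (v : List (List (String × Int))) : Bool :=
  v.length == 1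
    || !(PySem.Dict.getD (PySem.Dict.mk (PySem.List.pyGetD v 0 [])) "value" 0
          == PySem.Dict.getD (PySem.Dict.mk (PySem.List.pyGetD v 1 [])) "value" 0)

-- Pre_ = exactly the inputs where Python A returns normally, under the dict encoding:
-- every vote is nonempty; v[0]["value"] and v[1]["value"] exist whenever len(v) > 1;
-- whenever a vote produces a winner, v[0]["id"] exists, that id is a key of dict_cand and
-- its candidate dict has key 'y' (otherwise A raises an Index/KeyError).  In addition every
-- association list must have distinct keys, because it encodes a Python dict, which cannot
-- hold duplicate keys (no Python input is excluded by this).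
def Pre_plurality_method (order_votes : List (List (List (String × Int)))) (dict_cand : List (Int × List (String × Int))) : Prop :=
  (dict_cand.map (·.1)).Nodup ∧
  (∀ p ∈ dict_cand, (keysOf p.2).Nodup) ∧
  ∀ v ∈ order_votes,
    v ≠ [] ∧
    (∀ cd ∈ v, (keysOf cd).Nodup) ∧
    (1 < v.length →
      "value" ∈ keysOf (PySem.List.pyGetD v 0 []) ∧
      "value" ∈ keysOf (PySem.List.pyGetD v 1 [])) ∧
    (winsb v = true →
      "id" ∈ keysOf (PySem.List.pyGetD v 0 []) ∧
      ∃ p ∈ dict_cand,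
        p.1 = PySem.Dict.getD (PySem.Dict.mk (PySem.List.pyGetD v 0 [])) "id" 0 ∧
        "y" ∈ keysOf p.2)

instance (order_votes : List (List (List (String × Int)))) (dict_cand : List (Int × List (String × Int))) : Decidable (Pre_plurality_method order_votes dict_cand) := by unfold Pre_plurality_method; infer_instance

def pvWitness_plurality_method : (List (List (List (String × Int)))) × (List (Int × List (String × Int))) :=
  ([[[("id", 1), ("value", 5)], [("id", 2), ("value", 3)]], [[("id", 2), ("value", 7)]]],
   [(1, [("y", 0)]), (2, [("y", 4)])])

def Spec_plurality_method (order_votes : List (List (List (String × Int)))) (dict_cand : List (Int × List (String × Int))) (out : List (List (String × Int))) : Prop := out = plurality_method_alt order_votes dict_cand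
instance (order_votes : List (List (List (String × Int)))) (dict_cand : List (Int × List (String × Int))) (out : List (List (String × Int))) : Decidable (Spec_plurality_method order_votes dict_cand out) := by unfold Spec_plurality_method; infer_instance

-- ===== CLAIM (what is proved, stated in full; the proofs are below) =====
def Claim_equal_plurality_method : Prop := ∀ (order_votes : List (List (List (String × Int)))) (dict_cand : List (Int × List (String × Int))), Dom_plurality_method order_votes dict_cand → Pre_plurality_method order_votes dict_cand → Spec_plurality_method order_votes dict_cand (plurality_method order_votes dict_cand)

-- ===== LEMMAS AND PROOFS =====

theorem pv_witness_ok :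
    Dom_plurality_method pvWitness_plurality_method.1 pvWitness_plurality_method.2 ∧
    Pre_plurality_method pvWitness_plurality_method.1 pvWitness_plurality_method.2 := by
  decide

-- winner id of a vote (proof-side abbreviation)
def widOf (v : List (List (String × Int))) : Int :=
  PySem.Dict.getD (PySem.Dict.mk (PySem.List.pyGetD v 0 [])) "id" 0

theorem bumpY_zero : ∀ cd : List (String × Int), bumpY cd 0 = cd
  | [] => rfl
  | (k, x) :: t => by
      unfold bumpY; split_ifs with h
      · simp
      · rw [bumpY_zero t]

theorem bumpY_add : ∀ (cd : List (String × Int)) (a b : Int),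
    bumpY (bumpY cd a) b = bumpY cd (a + b)
  | [], _, _ => rfl
  | (k, x) :: t, a, b => by
      unfold bumpY; split_ifs with h
      · simp [bumpY, h, add_assoc]
      · simp [bumpY, h, bumpY_add t a b]

theorem keys_bumpAt : ∀ (d : List (Int × List (String × Int))) (i n : Int),
    (bumpAt d i n).map (·.1) = d.map (·.1)
  | [], _, _ => rfl
  | (k, cd) :: t, i, n => by
      unfold bumpAt; split_ifs with h
      · simp
      · simp [keys_bumpAt t i n]

theorem map_bump_untouched :
    ∀ (d : List (Int × List (String × Int))) (k : Int) (f : List (String × Int) → List (String × Int)),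
    (∀ p ∈ d, p.1 ≠ k) →
    d.map (fun p => (p.1, if p.1 = k then f p.2 else p.2)) = d
  | [], _, _, _ => rfl
  | (k0, cd) :: t, k, f, h => by
      have h0 : k0 ≠ k := h (k0, cd) (by simp)
      simp only [List.map_cons, if_neg h0]
      rw [map_bump_untouched t k f (fun p hp => h p (List.mem_cons_of_mem _ hp))]

theorem bumpAt_eq_map : ∀ (d : List (Int × List (String × Int))) (k n : Int),
    (d.map (·.1)).Nodup →
    bumpAt d k n = d.map (fun p => (p.1, if p.1 = k then bumpY p.2 n else p.2))
  | [], _, _, _ => rfl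
  | (k0, cd) :: t, k, n, hnd => by
      simp only [List.map_cons, List.nodup_cons] at hnd
      unfold bumpAt; split_ifs with h
      · subst h
        simp only [List.map_cons]
        rw [map_bump_untouched t k0 (fun cd => bumpY cd n)
          (fun p hp hk => hnd.1 (hk ▸ List.mem_map_of_mem hp))]
        simp
      · simp only [List.map_cons, if_neg h]
        rw [bumpAt_eq_map t k n hnd.2]

-- generic fold-with-guard extraction: a guarded accumulation over l equals the plain
-- accumulation over the filtered-and-mapped list
theorem foldl_if_filter {α β γ : Type} (p : α → Bool) (g : α → γ) (f : β → γ → β) :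
    ∀ (l : List α) (init : β),
    l.foldl (fun acc x => if p x then f acc (g x) else acc) init
      = ((l.filter p).map g).foldl f init
  | [], _ => rfl
  | x :: l, init => by
      by_cases h : p x
      · simp only [List.foldl_cons, List.filter_cons, h, if_pos, List.map_cons]
        exact foldl_if_filter p g f l (f init (g x))
      · simp only [List.foldl_cons, List.filter_cons, h, Bool.false_eq_true, if_false]
        exact foldl_if_filter p g f l init

-- canonical form of A's accumulation: each candidate's 'y' grows by the number of
-- winner ids equal to its key
theorem foldl_bump1 : ∀ (ws : List Int) (dc : List (Int × List (String × Int))),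
    (dc.map (·.1)).Nodup →
    ws.foldl (fun d w => bumpAt d w 1) dc
      = dc.map (fun p => (p.1, bumpY p.2 ((ws.count p.1 : Int))))
  | [], dc, _ => by
      simp [bumpY_zero]
  | w :: ws, dc, hnd => by
      have hnd' : ((bumpAt dc w 1).map (·.1)).Nodup := by rw [keys_bumpAt]; exact hnd
      rw [List.foldl_cons, foldl_bump1 ws (bumpAt dc w 1) hnd', bumpAt_eq_map dc w 1 hnd,
        List.map_map]
      apply List.map_congr_left
      intro p _
      simp only [Function.comp]
      by_cases h : p.1 = w
      · have hc : (1 : Int) + (ws.count p.1 : Int) = (((w :: ws).count p.1 : Nat) : Int) := by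
          have : (w :: ws).count p.1 = ws.count p.1 + 1 := by simp [h]
          rw [this]; push_cast; ring
        rw [if_pos h, bumpY_add, hc]
      · have : (w :: ws).count p.1 = ws.count p.1 := by
          simp [List.count_cons]
          exact fun hh => h hh.symm
        rw [if_neg h, this]

-- A's loop body, rewritten with the winner test (valid for nonempty votes)
theorem stepA_eq (v : List (List (String × Int))) (hv : v ≠ [])
    (d : List (Int × List (String × Int))) :
    (let v0 := PySem.List.pyGetD v 0 []
     if 1 < (v.length : Int) then
        if PySem.Dict.getD (PySem.Dict.mk v0) "value" 0
             ≠ PySem.Dict.getD (PySem.Dict.mk (PySem.List.pyGetD v 1 [])) "value" 0 then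
          bumpAt d (PySem.Dict.getD (PySem.Dict.mk v0) "id" 0) 1
        else d
      else
        bumpAt d (PySem.Dict.getD (PySem.Dict.mk v0) "id" 0) 1)
      = if winsb v then bumpAt d (widOf v) 1 else d := by
  have hlen : 1 ≤ v.length := List.length_pos_of_ne_nil hv
  by_cases hgt : 1 < v.length
  · have hc : (1 : Int) < (v.length : Int) := by exact_mod_cast hgt
    have hne : (v.length == 1) = false := by
      rw [beq_eq_false_iff_ne]; omega
    by_cases hv01 : PySem.Dict.getD (PySem.Dict.mk (PySem.List.pyGetD v 0 [])) "value" 0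
        = PySem.Dict.getD (PySem.Dict.mk (PySem.List.pyGetD v 1 [])) "value" 0
    · have : winsb v = false := by simp [winsb, hne, hv01]
      simp [hc, hv01, this]
    · have : winsb v = true := by simp [winsb, hne, hv01]
      simp [hc, hv01, this, widOf]
  · have h1 : v.length = 1 := by omega
    have hc : ¬ ((1 : Int) < (v.length : Int)) := by exact_mod_cast hgt
    have : winsb v = true := by simp [winsb, h1]
    simp [hc, this, widOf]

-- B's inner scan counts exactly the occurrences of cid among the winner ids
theorem countFor_aux (cid : Int) : ∀ (ov : List (List (List (String × Int)))) (s : Int),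
    ov.foldl
      (fun s v =>
        if ((v.length == 1)
              || !(PySem.Dict.getD (PySem.Dict.mk (PySem.List.pyGetD v 0 [])) "value" 0
                    == PySem.Dict.getD (PySem.Dict.mk (PySem.List.pyGetD v 1 [])) "value" 0))
            && (PySem.Dict.getD (PySem.Dict.mk (PySem.List.pyGetD v 0 [])) "id" 0 == cid)
        then s + 1 else s) s
      = s + ((((ov.filter winsb).map widOf).count cid : Nat) : Int)
  | [], s => by simp
  | v :: ov, s => by
      rw [List.foldl_cons]
      by_cases hw : winsb v
      · by_cases hid : widOf v = cid
        · have hg : (((v.length == 1)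
              || !(PySem.Dict.getD (PySem.Dict.mk (PySem.List.pyGetD v 0 [])) "value" 0
                    == PySem.Dict.getD (PySem.Dict.mk (PySem.List.pyGetD v 1 [])) "value" 0))
            && (PySem.Dict.getD (PySem.Dict.mk (PySem.List.pyGetD v 0 [])) "id" 0 == cid)) = true := by
            simp only [winsb] at hw
            simp only [widOf] at hid
            simp [hw, hid]
          rw [if_pos hg, countFor_aux cid ov (s + 1)]
          have : ((v :: ov).filter winsb).map widOf = widOf v :: ((ov.filter winsb).map widOf) := by
            simp [hw]
          rw [this, List.count_cons]
          simp [hid]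
          ring
        · have hg : (((v.length == 1)
              || !(PySem.Dict.getD (PySem.Dict.mk (PySem.List.pyGetD v 0 [])) "value" 0
                    == PySem.Dict.getD (PySem.Dict.mk (PySem.List.pyGetD v 1 [])) "value" 0))
            && (PySem.Dict.getD (PySem.Dict.mk (PySem.List.pyGetD v 0 [])) "id" 0 == cid)) = false := by
            simp only [widOf] at hid
            simp [hid]
          rw [if_neg (by simp [hg]), countFor_aux cid ov s]
          have : ((v :: ov).filter winsb).map widOf = widOf v :: ((ov.filter winsb).map widOf) := by
            simp [hw]
          rw [this, List.count_cons]
          simp [hid]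
      · have hg : (((v.length == 1)
            || !(PySem.Dict.getD (PySem.Dict.mk (PySem.List.pyGetD v 0 [])) "value" 0
                  == PySem.Dict.getD (PySem.Dict.mk (PySem.List.pyGetD v 1 [])) "value" 0))
          && (PySem.Dict.getD (PySem.Dict.mk (PySem.List.pyGetD v 0 [])) "id" 0 == cid)) = false := by
          have hwf : winsb v = false := by simpa using hw
          simp only [winsb] at hwf
          simp only [hwf, Bool.false_and]
        rw [if_neg (by simp [hg]), countFor_aux cid ov s]
        have : ((v :: ov).filter winsb) = ov.filter winsb := by
          simp [hw]
        rw [this]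

theorem countFor_eq (ov : List (List (List (String × Int)))) (cid : Int) :
    countFor ov cid = ((((ov.filter winsb).map widOf).count cid : Nat) : Int) := by
  unfold countFor
  rw [countFor_aux cid ov 0]
  ring

-- ===== VERDICT (by name: the statement is the Claim_ definition above) =====
theorem plurality_method_spec : Claim_equal_plurality_method := by
  intro ov dc _hdom hpre
  obtain ⟨hnd, _hcd, hv⟩ := hpre
  unfold Spec_plurality_method plurality_method plurality_method_alt
  rw [PySem.List.foldl_congr_mem ov _
      (fun d v => if winsb v then bumpAt d (widOf v) 1 else d) dc
      (fun d v hvmem => stepA_eq v (hv v hvmem).1 d)]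
  rw [foldl_if_filter winsb widOf (fun d w => bumpAt d w 1) ov dc]
  rw [foldl_bump1 _ dc hnd]
  congr 1
  apply List.map_congr_left
  intro p _
  by_cases hn : countFor ov p.1 = 0
  · simp only [hn, ne_eq, not_true_eq_false, if_false]
    rw [← countFor_eq ov p.1, hn, bumpY_zero]
  · simp only [ne_eq, hn, not_false_eq_true, if_true]
    rw [countFor_eq ov p.1]
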